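-- pv_equiv track=rewrite | github.com/Avos-Lab/git-aware-coding-agent | avos_cli/commands/team.py | _group_by_developer
-- ===== SOURCE A (Python) =====
-- def _group_by_developer(
--     artifacts: list[dict[str, str]]
-- ) -> list[tuple[str, list[dict[str, str]]]]:
--     """Group artifacts by normalized developer name.
--
--     Sorting: groups by developer_normalized ASC,
--     entries within by timestamp DESC, branch_normalized ASC, artifact_id ASC.
--
--     Args:
--         artifacts: Active artifact dicts.
--
--     Returns:
--         Sorted list of (developer, entries) tuples.
--     """
--     groups: dict[str, list[dict[str, str]]] = {}
--     for art in artifacts: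
--         dev = art.get("developer", "unknown").strip().lower()
--         groups.setdefault(dev, []).append(art)
--
--     for entries in groups.values():
--         entries.sort(
--             key=lambda a: (
--                 a.get("timestamp", "") or "",
--                 a.get("branch", "").strip().lower(),
--                 a.get("_note_id", ""),
--             ),
--         )
--         entries.reverse()
--         entries.sort(
--             key=lambda a: (
--                 -(ord(a.get("timestamp", " ")[0]) if a.get("timestamp") else 0),
--             ),
--         )
--         entries.sort(
--             key=lambda a: (
--                 a.get("branch", "").strip().lower(),
--                 a.get("_note_id", ""),
--             ),
--         )
--         entries.sort(key=lambda a: a.get("timestamp", ""), reverse=True)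
--
--     sorted_groups = sorted(groups.items(), key=lambda g: g[0])
--     return sorted_groups
-- ===== SOURCE B (Python) =====
-- from itertools import groupby
--
--
-- def _group_by_developer(artifacts):
--     """Same grouping/ordering as the dict-based original, done with three
--     stable global sort passes over the reversed list plus itertools.groupby."""
--     def dev(a):
--         return a.get("developer", "unknown").strip().lower()
--
--     rows = list(reversed(artifacts))
--     rows.sort(key=lambda a: (a.get("branch", "").strip().lower(),
--                              a.get("_note_id", "")))
--     rows.sort(key=lambda a: a.get("timestamp", ""), reverse=True)
--     rows.sort(key=dev)
--     return [(d, list(g)) for d, g in groupby(rows, key=dev)]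
-- ===== Notes on version B (the rewrite author's own statement) =====
-- stated objective: simpler
-- what changed: B drops the per-developer dict accumulation and A's four per-group sort passes (including the redundant triple-key sort, reverse, and -ord(first char) pass): it sorts the reversed artifact list globally with three stable passes ((branch,note) asc, timestamp desc, developer asc) and splits consecutive developer runs with itertools.groupby.
import Mathlib
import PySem

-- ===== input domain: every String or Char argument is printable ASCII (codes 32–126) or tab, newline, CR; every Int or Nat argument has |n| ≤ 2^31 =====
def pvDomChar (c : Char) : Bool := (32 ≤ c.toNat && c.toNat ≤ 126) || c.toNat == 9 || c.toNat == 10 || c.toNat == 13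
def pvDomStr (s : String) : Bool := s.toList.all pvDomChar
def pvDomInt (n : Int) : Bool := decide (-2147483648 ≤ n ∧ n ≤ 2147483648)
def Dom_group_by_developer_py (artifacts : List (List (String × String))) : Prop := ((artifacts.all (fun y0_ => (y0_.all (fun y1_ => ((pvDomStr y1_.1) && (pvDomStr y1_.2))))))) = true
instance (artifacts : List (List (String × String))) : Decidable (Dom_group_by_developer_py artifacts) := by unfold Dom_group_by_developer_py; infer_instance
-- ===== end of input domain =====

-- B replaces the per-developer dict accumulation and four per-group sort passes by three
-- global stable sort passes over the reversed input plus an itertools.groupby run split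
-- (objective: simpler).  Neither version mutates its argument; equivalence is about the
-- return value.

-- shared helpers: the artifact field accessors both Pythons spell out as a.get(...) chains
-- (dict → association list, lookup = first match)
def pvGet (a : List (String × String)) (k d : String) : String := (List.lookup k a).getD d
def pvDev (a : List (String × String)) : String := PySem.Str.lower (PySem.Str.strip (pvGet a "developer" "unknown"))
def pvTs (a : List (String × String)) : String := pvGet a "timestamp" ""
def pvBn (a : List (String × String)) : Lex (String × String) :=
  toLex (PySem.Str.lower (PySem.Str.strip (pvGet a "branch" "")), pvGet a "_note_id" "")

-- ===== PORT A =====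
-- A-only keys: the (timestamp or "", branch, note) triple and the -ord(first char) key.
-- Python tuple keys are ported as lexicographic (Lex) product keys.
def pvTrip (a : List (String × String)) : Lex (String × Lex (String × String)) :=
  toLex ((if pvTs a = "" then "" else pvTs a), pvBn a)          -- `a.get("timestamp","") or ""`
-- -(ord(a.get("timestamp", " ")[0]) if a.get("timestamp") else 0); the `.getD ' '` arm of the
-- indexing is unreachable (the string is nonempty whenever it is read)
def pvOrd (a : List (String × String)) : Int :=
  -(if pvTs a ≠ "" then (((PySem.Str.pyGet? (pvGet a "timestamp" " ") 0).getD ' ').toNat : Int) else 0)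

def pvProcessA (entries : List (List (String × String))) : List (List (String × String)) :=
  let e1 := PySem.List.sorted entries pvTrip false
  let e2 := e1.reverse
  let e3 := PySem.List.sorted e2 pvOrd false
  let e4 := PySem.List.sorted e3 pvBn false
  PySem.List.sorted e4 pvTs true

def group_by_developer_py (artifacts : List (List (String × String))) : List (String × (List (List (String × String)))) :=
  let groups : PySem.Dict String (List (List (String × String))) :=
    artifacts.foldl (fun d a => d.modify (pvDev a) [] (fun l => l ++ [a])) PySem.Dict.empty
  let items := groups.items.map (fun kv => (kv.1, pvProcessA kv.2))
  PySem.List.sorted items (fun g => g.1) false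

-- ===== PORT B =====
-- itertools.groupby over a key: consecutive runs of equal key values
def pvGroupby (key : List (String × String) → String) :
    List (List (String × String)) → List (String × List (List (String × String)))
  | [] => []
  | r :: rest =>
    (key r, r :: rest.takeWhile (fun a => key a == key r)) ::
      pvGroupby key (rest.dropWhile (fun a => key a == key r))
  termination_by l => l.length
  decreasing_by
    simpa using Nat.lt_succ_of_le (List.length_dropWhile_le _ rest)

def group_by_developer_py_alt (artifacts : List (List (String × String))) : List (String × (List (List (String × String)))) :=
  let rows0 := artifacts.reverse
  let rows1 := PySem.List.sorted rows0 pvBn false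
  let rows2 := PySem.List.sorted rows1 pvTs true
  let rows3 := PySem.List.sorted rows2 pvDev false
  pvGroupby pvDev rows3

-- ===== PRECONDITION & SPEC =====
def Spec_group_by_developer_py (artifacts : List (List (String × String))) (out : List (String × (List (List (String × String))))) : Prop := out = group_by_developer_py_alt artifacts
instance (artifacts : List (List (String × String))) (out : List (String × (List (List (String × String))))) : Decidable (Spec_group_by_developer_py artifacts out) := by unfold Spec_group_by_developer_py; infer_instance

-- ===== CLAIM (what is proved, stated in full; the proofs are below) =====
def Claim_equal_group_by_developer_py : Prop := ∀ (artifacts : List (List (String × String))), Dom_group_by_developer_py artifacts → Spec_group_by_developer_py artifacts (group_by_developer_py artifacts)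

-- ===== LEMMAS AND PROOFS =====

-- pvOrd is a function of the timestamp alone
def pvOrdStr (c : String) : Int :=
  -(if c ≠ "" then (((PySem.Str.pyGet? c 0).getD ' ').toNat : Int) else 0)

theorem pv_ins_head {α : Type} (bef : α → α → Bool) (x : α) (L : List α)
    (h : ∀ a ∈ L, bef x a = true) : PySem.List.insertBy bef x L = x :: L := by
  cases L with
  | nil => rfl
  | cons y ys => simp [PySem.List.insertBy, h y (by simp)]

theorem pv_ins_app {α : Type} (bef : α → α → Bool) (x : α) (A B : List α)
    (h : ∀ a ∈ A, bef x a = false) :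
    PySem.List.insertBy bef x (A ++ B) = A ++ PySem.List.insertBy bef x B := by
  induction A with
  | nil => rfl
  | cons a A ih =>
    simp only [List.cons_append, PySem.List.insertBy, h a (by simp)]
    simp only [Bool.false_eq_true, if_false]
    rw [ih (fun a ha => h a (by simp [ha]))]

theorem pv_ins_filter {α : Type} (bef : α → α → Bool) (p : α → Bool) (x : α) (S : List α)
    (R : α → α → Prop) (hS : S.Pairwise R)
    (hmono : ∀ a b, R a b → bef x a = true → bef x b = true) :
    (PySem.List.insertBy bef x S).filter p =
      if p x then PySem.List.insertBy bef x (S.filter p) else S.filter p := by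
  induction S with
  | nil =>
    by_cases hpx : p x = true <;>
      simp [PySem.List.insertBy, List.filter_cons, hpx]
  | cons y S ih =>
    rcases List.pairwise_cons.mp hS with ⟨hy, hS'⟩
    by_cases hxy : bef x y = true
    · rw [show PySem.List.insertBy bef x (y :: S) = x :: y :: S by simp [PySem.List.insertBy, hxy]]
      by_cases hpx : p x = true
      · by_cases hpy : p y = true
        · simp [List.filter_cons, hpx, hpy, PySem.List.insertBy, hxy]
        · rw [List.filter_cons_of_pos hpx, List.filter_cons_of_neg (by simp [hpy]), hpx, if_pos rfl,
            pv_ins_head bef x (S.filter p)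
              (fun a ha => hmono y a (hy a (List.mem_of_mem_filter ha)) hxy)]
      · rw [List.filter_cons_of_neg (by simp [hpx]), if_neg hpx]
    · rw [show PySem.List.insertBy bef x (y :: S) = y :: PySem.List.insertBy bef x S by
        simp [PySem.List.insertBy, hxy]]
      by_cases hpy : p y = true
      · rw [List.filter_cons_of_pos hpy, ih hS',
          List.filter_cons_of_pos hpy]
        by_cases hpx : p x = true
        · rw [hpx, if_pos rfl, if_pos rfl, show PySem.List.insertBy bef x (y :: S.filter p)
            = y :: PySem.List.insertBy bef x (S.filter p) by simp [PySem.List.insertBy, hxy]]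
        · simp [hpx]
      · rw [List.filter_cons_of_neg (by simp [hpy]), ih hS',
          List.filter_cons_of_neg (by simp [hpy])]

theorem pv_sorted_append {α κ : Type} [LT κ] [DecidableLT κ] (xs : List α) (x : α) (k : α → κ) (rev : Bool) :
    PySem.List.sorted (xs ++ [x]) k rev =
      PySem.List.insertBy
        (if rev = true then fun a b => decide (k b < k a) else fun a b => decide (k a < k b)) x
        (PySem.List.sorted xs k rev) := by
  simp [PySem.List.sorted, List.foldl_append]

theorem pv_filter_sorted {α κ : Type} [LinearOrder κ] (k : α → κ) (rev : Bool) (p : α → Bool) (xs : List α) :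
    (PySem.List.sorted xs k rev).filter p = PySem.List.sorted (xs.filter p) k rev := by
  cases rev
  · induction xs using List.reverseRecOn with
    | nil => rfl
    | append_singleton xs x ih =>
      by_cases hpx : p x = true
      · rw [pv_sorted_append, if_neg (by simp), List.filter_append,
          show List.filter p [x] = [x] by simp [hpx],
          pv_sorted_append, if_neg (by simp),
          pv_ins_filter _ p x _ (fun a b => k a ≤ k b) (PySem.List.sorted_pairwise xs k)
            (fun a b hr hb => by simp only [decide_eq_true_eq] at *; exact lt_of_lt_of_le hb hr),
          if_pos hpx, ih]
      · rw [pv_sorted_append, if_neg (by simp), List.filter_append,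
          show List.filter p [x] = [] by simp [hpx], List.append_nil,
          pv_ins_filter _ p x _ (fun a b => k a ≤ k b) (PySem.List.sorted_pairwise xs k)
            (fun a b hr hb => by simp only [decide_eq_true_eq] at *; exact lt_of_lt_of_le hb hr),
          if_neg hpx, ih]
  · induction xs using List.reverseRecOn with
    | nil => rfl
    | append_singleton xs x ih =>
      by_cases hpx : p x = true
      · rw [pv_sorted_append, if_pos rfl, List.filter_append,
          show List.filter p [x] = [x] by simp [hpx],
          pv_sorted_append, if_pos rfl,
          pv_ins_filter _ p x _ (fun a b => k b ≤ k a) (PySem.List.sorted_pairwise_rev xs k)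
            (fun a b hr hb => by simp only [decide_eq_true_eq] at *; exact lt_of_le_of_lt hr hb),
          if_pos hpx, ih]
      · rw [pv_sorted_append, if_pos rfl, List.filter_append,
          show List.filter p [x] = [] by simp [hpx], List.append_nil,
          pv_ins_filter _ p x _ (fun a b => k b ≤ k a) (PySem.List.sorted_pairwise_rev xs k)
            (fun a b hr hb => by simp only [decide_eq_true_eq] at *; exact lt_of_le_of_lt hr hb),
          if_neg hpx, ih]

theorem pv_sorted_const {α κ : Type} [LinearOrder κ] (k : α → κ) (rev : Bool) (v : κ) (xs : List α)
    (h : ∀ a ∈ xs, k a = v) : PySem.List.sorted xs k rev = xs := by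
  cases rev
  · exact PySem.List.sorted_eq_self_of_pairwise xs k
      (List.pairwise_of_forall_mem_list (fun a ha b hb => by rw [h a ha, h b hb]))
  · exact PySem.List.sorted_rev_eq_self_of_pairwise xs k
      (List.pairwise_of_forall_mem_list (fun a ha b hb => by rw [h a ha, h b hb]))

theorem pv_filter_sorted_keyconst {α κ : Type} [LinearOrder κ] (k : α → κ) (rev : Bool)
    (p : α → Bool) (v : κ) (xs : List α) (hp : ∀ a, p a = true → k a = v) :
    (PySem.List.sorted xs k rev).filter p = xs.filter p := by
  rw [pv_filter_sorted]
  exact pv_sorted_const k rev v _ (fun a ha => hp a (List.of_mem_filter ha))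

theorem pv_split3_lt {κ : Type} [LinearOrder κ] (vs : List κ) (w : κ)
    (h : vs.Pairwise (· < ·)) :
    vs = vs.filter (fun v => decide (v < w)) ++ vs.filter (fun v => decide (v = w))
        ++ vs.filter (fun v => decide (w < v)) := by
  induction vs with
  | nil => rfl
  | cons y t ih =>
    rcases List.pairwise_cons.mp h with ⟨hy, ht⟩
    rcases lt_trichotomy y w with hc | hc | hc
    · rw [List.filter_cons_of_pos (by simp [hc]),
        List.filter_cons_of_neg (by simp [ne_of_lt hc]),
        List.filter_cons_of_neg (by simp [not_lt_of_gt hc])]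
      simpa using congrArg (y :: ·) (ih ht)
    · subst hc
      rw [List.filter_cons_of_neg (by simp), List.filter_cons_of_pos (by simp),
        List.filter_cons_of_neg (by simp),
        List.filter_eq_nil_iff.mpr (fun a ha => by simp [not_lt_of_gt (hy a ha)]),
        List.filter_eq_nil_iff.mpr (fun a ha => by simp [(ne_of_gt (hy a ha))]),
        List.filter_eq_self.mpr (fun a ha => by simp [hy a ha])]
      simp
    · rw [List.filter_cons_of_neg (by simp [not_lt_of_gt hc]),
        List.filter_cons_of_neg (by simp [(ne_of_gt hc)]),
        List.filter_cons_of_pos (by simp [hc]),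
        List.filter_eq_nil_iff.mpr (fun a ha => by simp [not_lt_of_gt (lt_trans hc (hy a ha))]),
        List.filter_eq_nil_iff.mpr (fun a ha => by simp [(ne_of_gt (lt_trans hc (hy a ha)))]),
        List.filter_eq_self.mpr (fun a ha => by simp [lt_trans hc (hy a ha)])]
      rfl

theorem pv_split3_gt {κ : Type} [LinearOrder κ] (vs : List κ) (w : κ)
    (h : vs.Pairwise (fun a b => b < a)) :
    vs = vs.filter (fun v => decide (w < v)) ++ vs.filter (fun v => decide (v = w))
        ++ vs.filter (fun v => decide (v < w)) := by
  induction vs with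
  | nil => rfl
  | cons y t ih =>
    rcases List.pairwise_cons.mp h with ⟨hy, ht⟩
    rcases lt_trichotomy y w with hc | hc | hc
    · rw [List.filter_cons_of_neg (by simp [not_lt_of_gt hc]),
        List.filter_cons_of_neg (by simp [ne_of_lt hc]),
        List.filter_cons_of_pos (by simp [hc]),
        List.filter_eq_nil_iff.mpr (fun a ha => by simp [not_lt_of_gt (lt_trans (hy a ha) hc)]),
        List.filter_eq_nil_iff.mpr (fun a ha => by simp [(ne_of_lt (lt_trans (hy a ha) hc))]),
        List.filter_eq_self.mpr (fun a ha => by simp [lt_trans (hy a ha) hc])]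
      rfl
    · subst hc
      rw [List.filter_cons_of_neg (by simp), List.filter_cons_of_pos (by simp),
        List.filter_cons_of_neg (by simp),
        List.filter_eq_nil_iff.mpr (fun a ha => by simp [not_lt_of_gt (hy a ha)]),
        List.filter_eq_nil_iff.mpr (fun a ha => by simp [(ne_of_lt (hy a ha))]),
        List.filter_eq_self.mpr (fun a ha => by simp [hy a ha])]
      simp
    · rw [List.filter_cons_of_pos (by simp [hc]),
        List.filter_cons_of_neg (by simp [(ne_of_gt hc)]),
        List.filter_cons_of_neg (by simp [not_lt_of_gt hc])]
      simpa using congrArg (y :: ·) (ih ht)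

theorem pv_filter_eq_singleton {κ : Type} [DecidableEq κ] (vs : List κ) (w : κ)
    (hnd : vs.Nodup) (hw : w ∈ vs) : vs.filter (fun v => decide (v = w)) = [w] := by
  induction vs with
  | nil => simp at hw
  | cons y ys ih =>
    rcases List.nodup_cons.mp hnd with ⟨hy, hys⟩
    rcases List.mem_cons.mp hw with h | h
    · rw [List.filter_cons_of_pos (by simp [h])]
      have : ys.filter (fun v => decide (v = w)) = [] := List.filter_eq_nil_iff.mpr
        (fun a ha => by simp; rintro rfl; exact hy (h ▸ ha))
      rw [this, h]
    · have hyw : y ≠ w := fun e => hy (e ▸ h)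
      rw [List.filter_cons]
      simp [hyw, ih hys h]

theorem pv_flatMap_congr {κ α : Type} (L : List κ) (f g : κ → List α)
    (h : ∀ v ∈ L, f v = g v) : L.flatMap f = L.flatMap g := by
  induction L with
  | nil => rfl
  | cons v L ih =>
    simp only [List.flatMap_cons, h v (by simp), ih (fun u hu => h u (by simp [hu]))]

theorem pv_char_asc {α κ : Type} [LinearOrder κ] (k : α → κ) (xs : List α) :
    PySem.List.sorted xs k false =
      (PySem.List.sorted (PySem.List.dedup (xs.map k)) (fun v => v) false).flatMap
        (fun v => xs.filter (fun a => decide (k a = v))) := by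
  induction xs using List.reverseRecOn with
  | nil => rfl
  | append_singleton xs x ih =>
    set w := k x with hw
    set vs := PySem.List.sorted (PySem.List.dedup (xs.map k)) (fun v => v) false with hvs
    have hvsnd : vs.Nodup := (PySem.List.sorted_perm _ _ _).symm.nodup
      (by rw [PySem.List.dedup_eq_ofList]; exact PySem.Set.nodup_ofList _)
    have hvslt : vs.Pairwise (· < ·) := by
      rw [hvs, PySem.List.dedup_eq_ofList]; exact PySem.List.sorted_ofList_pairwise_lt _
    have hvsmem : ∀ {v}, v ∈ vs ↔ v ∈ xs.map k := fun {v} =>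
      (PySem.List.sorted_perm _ _ _).mem_iff.trans (PySem.List.mem_dedup _ _)
    set f : κ → List α := fun v => xs.filter (fun a => decide (k a = v)) with hf
    set f' : κ → List α := fun v => (xs ++ [x]).filter (fun a => decide (k a = v)) with hf'
    set A := vs.filter (fun v => decide (v < w)) with hA
    set Bv := vs.filter (fun v => decide (v = w)) with hB
    set C := vs.filter (fun v => decide (w < v)) with hC
    have hsplit : vs = A ++ Bv ++ C := pv_split3_lt vs w hvslt
    have hkey : ∀ v (a : α), a ∈ f v → k a = v := by
      intro v a ha; simpa using List.of_mem_filter ha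
    have hABf : ∀ a ∈ A.flatMap f ++ Bv.flatMap f, (decide (k x < k a)) = false := by
      intro a ha
      rcases List.mem_append.mp ha with h | h <;>
        obtain ⟨v, hv, hav⟩ := List.mem_flatMap.mp h
      · have := List.of_mem_filter hv; simp only [decide_eq_true_eq] at this
        simp [hkey v a hav, not_lt_of_gt this, ← hw]
      · have := List.of_mem_filter hv; simp only [decide_eq_true_eq] at this
        simp [hkey v a hav, this, ← hw]
    have hCf : ∀ a ∈ C.flatMap f, (decide (k x < k a)) = true := by
      intro a ha
      obtain ⟨v, hv, hav⟩ := List.mem_flatMap.mp ha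
      have := List.of_mem_filter hv; simp only [decide_eq_true_eq] at this
      simp [hkey v a hav, this, ← hw]
    have hfne : ∀ (L : List κ), (∀ v ∈ L, v ≠ w) → L.flatMap f' = L.flatMap f := by
      intro L hL
      apply pv_flatMap_congr
      intro v hv
      rw [hf', hf]
      simp only [List.filter_append]
      have : (List.filter (fun a => decide (k a = v)) [x]) = [] := by
        simp [← hw, (hL v hv).symm]
      simp [this]
    rw [pv_sorted_append, if_neg (by simp), ih, hsplit,
      List.flatMap_append, List.flatMap_append,
      pv_ins_app _ x _ _ hABf, pv_ins_head _ x _ hCf]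
    by_cases hmem : w ∈ xs.map k
    · have hveq : PySem.List.dedup (List.map k (xs ++ [x])) = PySem.List.dedup (List.map k xs) := by
        rw [List.map_append, List.map_singleton, PySem.List.dedup_eq_ofList,
          PySem.List.dedup_eq_ofList, PySem.Set.ofList_append_singleton,
          PySem.Set.add_of_mem ((PySem.Set.mem_ofList _ _).mpr hmem)]
      have hBv : Bv = [w] := pv_filter_eq_singleton vs w hvsnd (hvsmem.mpr hmem)
      rw [hveq, ← hvs, hsplit, List.flatMap_append, List.flatMap_append,
        hfne A (fun v hv => by have := List.of_mem_filter hv; simp only [decide_eq_true_eq] at this; exact ne_of_lt this),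
        hfne C (fun v hv => by have := List.of_mem_filter hv; simp only [decide_eq_true_eq] at this; exact ne_of_gt this),
        hBv]
      have hfw : [w].flatMap f' = f w ++ [x] := by
        simp only [List.flatMap_cons, List.flatMap_nil, List.append_nil, hf', hf,
          List.filter_append]
        simp [← hw]
      rw [hfw]
      simp [List.append_assoc]
    · have hwvs : w ∉ vs := fun hwv => hmem (hvsmem.mp hwv)
      have hBv : Bv = [] := List.filter_eq_nil_iff.mpr
        (fun v hv => by simp; rintro rfl; exact hwvs hv)
      have hfw0 : f w = [] := List.filter_eq_nil_iff.mpr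
        (fun a ha => by simp; intro e; exact hmem (e ▸ List.mem_map_of_mem (f := k) ha))
      have hveq : PySem.List.dedup (List.map k (xs ++ [x]))
          = PySem.List.dedup (List.map k xs) ++ [w] := by
        rw [List.map_append, List.map_singleton, PySem.List.dedup_eq_ofList,
          PySem.List.dedup_eq_ofList, PySem.Set.ofList_append_singleton,
          PySem.Set.add_of_not_mem (fun hc => hmem ((PySem.Set.mem_ofList _ _).mp hc))]
      have hAC : A ++ C = vs := by
        conv_rhs => rw [hsplit, hBv]
        simp
      have hvs' : PySem.List.sorted (PySem.List.dedup (List.map k xs) ++ [w]) (fun v => v) false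
          = A ++ w :: C := by
        apply PySem.List.sorted_eq_of_perm_of_pairwise_lt
        · have p1 : (A ++ w :: C).Perm (w :: (A ++ C)) := List.perm_middle
          have p2 : (w :: (A ++ C)).Perm (w :: PySem.List.dedup (List.map k xs)) := by
            rw [hAC]; exact ((PySem.List.sorted_perm _ _ _)).cons w
          exact (p1.trans p2).trans (List.perm_append_singleton _ _).symm
        · rw [List.pairwise_append]
          refine ⟨(hvslt.sublist List.filter_sublist), ?_, ?_⟩
          · rw [List.pairwise_cons]
            refine ⟨fun c hc => by simpa using List.of_mem_filter hc,
              (hvslt.sublist List.filter_sublist)⟩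
          · intro a ha b hb
            have haw : a < w := by simpa using List.of_mem_filter ha
            rcases List.mem_cons.mp hb with rfl | hb
            · exact haw
            · exact lt_trans haw (by simpa using List.of_mem_filter hb)
      rw [hveq, hvs', List.flatMap_append, List.flatMap_cons,
        hfne A (fun v hv => by have := List.of_mem_filter hv; simp only [decide_eq_true_eq] at this; exact ne_of_lt this),
        hfne C (fun v hv => by have := List.of_mem_filter hv; simp only [decide_eq_true_eq] at this; exact ne_of_gt this),
        show f' w = f w ++ [x] by rw [hf', hf]; simp [List.filter_append, ← hw],
        hfw0, hBv]
      simp [List.append_assoc]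

theorem pv_char_desc {α κ : Type} [LinearOrder κ] (k : α → κ) (xs : List α) :
    PySem.List.sorted xs k true =
      (PySem.List.sorted (PySem.List.dedup (xs.map k)) (fun v => v) true).flatMap
        (fun v => xs.filter (fun a => decide (k a = v))) := by
  induction xs using List.reverseRecOn with
  | nil => rfl
  | append_singleton xs x ih =>
    set w := k x with hw
    set vs := PySem.List.sorted (PySem.List.dedup (List.map k xs)) (fun v => v) true with hvs
    have hvsnd : vs.Nodup := (PySem.List.sorted_perm _ _ _).symm.nodup
      (by rw [PySem.List.dedup_eq_ofList]; exact PySem.Set.nodup_ofList _)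
    have hvslt : vs.Pairwise (fun a b => b < a) := by
      have h1 := PySem.List.sorted_pairwise_rev (PySem.List.dedup (List.map k xs)) (fun v => v)
      have h2 := List.Pairwise.and h1 hvsnd
      exact h2.imp (fun hab => lt_of_le_of_ne hab.1 (fun e => hab.2 e.symm))
    have hvsmem : ∀ {v}, v ∈ vs ↔ v ∈ xs.map k := fun {v} =>
      (PySem.List.sorted_perm _ _ _).mem_iff.trans (PySem.List.mem_dedup _ _)
    set f : κ → List α := fun v => xs.filter (fun a => decide (k a = v)) with hf
    set f' : κ → List α := fun v => (xs ++ [x]).filter (fun a => decide (k a = v)) with hf'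
    set G := vs.filter (fun v => decide (w < v)) with hG
    set Bv := vs.filter (fun v => decide (v = w)) with hB
    set A := vs.filter (fun v => decide (v < w)) with hA
    have hsplit : vs = G ++ Bv ++ A := pv_split3_gt vs w hvslt
    have hkey : ∀ v (a : α), a ∈ f v → k a = v := by
      intro v a ha; simpa using List.of_mem_filter ha
    have hABf : ∀ a ∈ G.flatMap f ++ Bv.flatMap f, (decide (k a < k x)) = false := by
      intro a ha
      rcases List.mem_append.mp ha with h | h <;>
        obtain ⟨v, hv, hav⟩ := List.mem_flatMap.mp h
      · have := List.of_mem_filter hv; simp only [decide_eq_true_eq] at this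
        simp [hkey v a hav, not_lt_of_gt this, ← hw]
      · have := List.of_mem_filter hv; simp only [decide_eq_true_eq] at this
        simp [hkey v a hav, this, ← hw]
    have hCf : ∀ a ∈ A.flatMap f, (decide (k a < k x)) = true := by
      intro a ha
      obtain ⟨v, hv, hav⟩ := List.mem_flatMap.mp ha
      have := List.of_mem_filter hv; simp only [decide_eq_true_eq] at this
      simp [hkey v a hav, this, ← hw]
    have hfne : ∀ (L : List κ), (∀ v ∈ L, v ≠ w) → L.flatMap f' = L.flatMap f := by
      intro L hL
      apply pv_flatMap_congr
      intro v hv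
      rw [hf', hf]
      simp only [List.filter_append]
      have : (List.filter (fun a => decide (k a = v)) [x]) = [] := by
        simp [← hw, (hL v hv).symm]
      simp [this]
    rw [pv_sorted_append, if_pos rfl, ih, hsplit,
      List.flatMap_append, List.flatMap_append,
      pv_ins_app _ x _ _ hABf, pv_ins_head _ x _ hCf]
    by_cases hmem : w ∈ xs.map k
    · have hveq : PySem.List.dedup (List.map k (xs ++ [x])) = PySem.List.dedup (List.map k xs) := by
        rw [List.map_append, List.map_singleton, PySem.List.dedup_eq_ofList,
          PySem.List.dedup_eq_ofList, PySem.Set.ofList_append_singleton,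
          PySem.Set.add_of_mem ((PySem.Set.mem_ofList _ _).mpr hmem)]
      have hBv : Bv = [w] := pv_filter_eq_singleton vs w hvsnd (hvsmem.mpr hmem)
      rw [hveq, ← hvs, hsplit, List.flatMap_append, List.flatMap_append,
        hfne G (fun v hv => by have := List.of_mem_filter hv; simp only [decide_eq_true_eq] at this; exact ne_of_gt this),
        hfne A (fun v hv => by have := List.of_mem_filter hv; simp only [decide_eq_true_eq] at this; exact ne_of_lt this),
        hBv]
      have hfw : [w].flatMap f' = f w ++ [x] := by
        simp only [List.flatMap_cons, List.flatMap_nil, List.append_nil, hf', hf,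
          List.filter_append]
        simp [← hw]
      rw [hfw]
      simp [List.append_assoc]
    · have hwvs : w ∉ vs := fun hwv => hmem (hvsmem.mp hwv)
      have hBv : Bv = [] := List.filter_eq_nil_iff.mpr
        (fun v hv => by simp; rintro rfl; exact hwvs hv)
      have hfw0 : f w = [] := List.filter_eq_nil_iff.mpr
        (fun a ha => by simp; intro e; exact hmem (e ▸ List.mem_map_of_mem (f := k) ha))
      have hveq : PySem.List.dedup (List.map k (xs ++ [x]))
          = PySem.List.dedup (List.map k xs) ++ [w] := by
        rw [List.map_append, List.map_singleton, PySem.List.dedup_eq_ofList,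
          PySem.List.dedup_eq_ofList, PySem.Set.ofList_append_singleton,
          PySem.Set.add_of_not_mem (fun hc => hmem ((PySem.Set.mem_ofList _ _).mp hc))]
      have hAC : G ++ A = vs := by
        conv_rhs => rw [hsplit, hBv]
        simp
      have hvs' : PySem.List.sorted (PySem.List.dedup (List.map k xs) ++ [w]) (fun v => v) true
          = G ++ w :: A := by
        apply PySem.List.sorted_rev_eq_of_perm_of_pairwise_gt
        · have p1 : (G ++ w :: A).Perm (w :: (G ++ A)) := List.perm_middle
          have p2 : (w :: (G ++ A)).Perm (w :: PySem.List.dedup (List.map k xs)) := by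
            rw [hAC]; exact ((PySem.List.sorted_perm _ _ _)).cons w
          exact (p1.trans p2).trans (List.perm_append_singleton _ _).symm
        · rw [List.pairwise_append]
          refine ⟨(hvslt.sublist List.filter_sublist), ?_, ?_⟩
          · rw [List.pairwise_cons]
            refine ⟨fun c hc => by simpa using List.of_mem_filter hc,
              (hvslt.sublist List.filter_sublist)⟩
          · intro a ha b hb
            have haw : w < a := by simpa using List.of_mem_filter ha
            rcases List.mem_cons.mp hb with rfl | hb
            · exact haw
            · exact lt_trans (by simpa using List.of_mem_filter hb) haw
      rw [hveq, hvs', List.flatMap_append, List.flatMap_cons,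
        hfne G (fun v hv => by have := List.of_mem_filter hv; simp only [decide_eq_true_eq] at this; exact ne_of_gt this),
        hfne A (fun v hv => by have := List.of_mem_filter hv; simp only [decide_eq_true_eq] at this; exact ne_of_lt this),
        show f' w = f w ++ [x] by rw [hf', hf]; simp [List.filter_append, ← hw],
        hfw0, hBv]
      simp [List.append_assoc]

theorem pv_char {α κ : Type} [LinearOrder κ] (k : α → κ) (rev : Bool) (xs : List α) :
    PySem.List.sorted xs k rev =
      (PySem.List.sorted (PySem.List.dedup (xs.map k)) (fun v => v) rev).flatMap
        (fun v => xs.filter (fun a => decide (k a = v))) := by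
  cases rev
  · exact pv_char_asc k xs
  · exact pv_char_desc k xs

theorem pv_sorted_vals_congr {κ : Type} [LinearOrder κ] (rev : Bool) (V V' : List κ)
    (h : V.Nodup) (hp : V.Perm V') :
    PySem.List.sorted V (fun v => v) rev = PySem.List.sorted V' (fun v => v) rev := by
  have hsp := PySem.List.sorted_perm V (fun v => v) rev
  have hnd : (PySem.List.sorted V (fun v => v) rev).Nodup := hsp.symm.nodup h
  cases rev
  · have hlt : (PySem.List.sorted V (fun v => v) false).Pairwise (· < ·) := by
      have h1 := PySem.List.sorted_pairwise V (fun v => v)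
      have h2 := List.Pairwise.and h1 hnd
      exact h2.imp (fun hab => lt_of_le_of_ne hab.1 hab.2)
    exact ((PySem.List.sorted_eq_of_perm_of_pairwise_lt V' _ (fun v => v)
      (hsp.trans hp) hlt)).symm
  · have hlt : (PySem.List.sorted V (fun v => v) true).Pairwise (fun a b => b < a) := by
      have h1 := PySem.List.sorted_pairwise_rev V (fun v => v)
      have h2 := List.Pairwise.and h1 hnd
      exact h2.imp (fun hab => lt_of_le_of_ne hab.1 (fun e => hab.2 e.symm))
    exact ((PySem.List.sorted_rev_eq_of_perm_of_pairwise_gt V' _ (fun v => v)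
      (hsp.trans hp) hlt)).symm

theorem pv_sortcong {α κ : Type} [LinearOrder κ] (k : α → κ) (rev : Bool) (X Y : List α)
    (hperm : X.Perm Y)
    (hcls : ∀ v, X.filter (fun a => decide (k a = v)) = Y.filter (fun a => decide (k a = v))) :
    PySem.List.sorted X k rev = PySem.List.sorted Y k rev := by
  rw [pv_char k rev X, pv_char k rev Y]
  have hnd : (PySem.List.dedup (X.map k)).Nodup := by
    rw [PySem.List.dedup_eq_ofList]; exact PySem.Set.nodup_ofList _
  have hnd' : (PySem.List.dedup (Y.map k)).Nodup := by
    rw [PySem.List.dedup_eq_ofList]; exact PySem.Set.nodup_ofList _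
  have hV : PySem.List.sorted (PySem.List.dedup (X.map k)) (fun v => v) rev
      = PySem.List.sorted (PySem.List.dedup (Y.map k)) (fun v => v) rev := by
    apply pv_sorted_vals_congr rev _ _ hnd
    rw [List.perm_ext_iff_of_nodup hnd hnd']
    intro v
    rw [PySem.List.mem_dedup, PySem.List.mem_dedup]
    exact (hperm.map k).mem_iff
  rw [hV, funext hcls]

theorem pv_dedup_sublist {α : Type} [BEq α] [LawfulBEq α] (l : List α) :
    (PySem.List.dedup l).Sublist l := by
  induction l with
  | nil => simp [PySem.List.dedup]
  | cons x xs ih =>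
    rw [PySem.List.dedup_eq_ofList] at *
    rw [PySem.Set.ofList_cons]
    exact List.Sublist.cons₂ x (List.Sublist.trans List.filter_sublist ih)

theorem pv_ord_of_ts (a : List (String × String)) (c : String) (h : pvTs a = c) :
    pvOrd a = pvOrdStr c := by
  unfold pvOrd pvOrdStr
  unfold pvTs pvGet at h
  cases hl : List.lookup "timestamp" a with
  | none => rw [hl] at h; simp at h; subst h; simp [pvTs, pvGet, hl]
  | some s =>
    rw [hl] at h; simp at h; subst h
    simp [pvTs, pvGet, hl]

theorem pv_dedup_run {α : Type} [BEq α] [LawfulBEq α] (c : α) (l1 l2 : List α)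
    (h1 : ∀ v ∈ l1, v = c) (h2 : c ∉ l2) :
    PySem.List.dedup (c :: (l1 ++ l2)) = c :: PySem.List.dedup l2 := by
  have hdisc : ∀ (S : List α), (∀ v ∈ S, v ≠ c) → PySem.Set.discard S c = S := by
    intro S hS
    unfold PySem.Set.discard
    exact List.filter_eq_self.mpr (fun a ha => by simpa using hS a ha)
  induction l1 with
  | nil =>
    rw [PySem.List.dedup_eq_ofList, PySem.List.dedup_eq_ofList]
    rw [List.nil_append, PySem.Set.ofList_cons]
    rw [hdisc _ (fun v hv => fun e => h2 ((PySem.Set.mem_ofList _ _).mp (e ▸ hv)))]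
  | cons d t ih =>
    have hdc : d = c := h1 d (by simp)
    subst hdc
    have ih' := ih (fun v hv => h1 v (by simp [hv]))
    rw [PySem.List.dedup_eq_ofList] at ih' ⊢
    rw [PySem.Set.ofList_cons] at ih' ⊢
    have hinner : PySem.Set.discard (PySem.Set.ofList (t ++ l2)) d = PySem.List.dedup l2 := by
      injection ih'
    have hstep : PySem.Set.ofList ((d :: t) ++ l2) = d :: PySem.List.dedup l2 := by
      rw [List.cons_append, PySem.Set.ofList_cons, hinner]
    rw [hstep]
    have : PySem.Set.discard (d :: PySem.List.dedup l2) d = PySem.Set.discard (PySem.List.dedup l2) d := by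
      unfold PySem.Set.discard
      rw [List.filter_cons_of_neg (by simp)]
    rw [this, hdisc _ (fun v hv => fun e => h2 ((PySem.List.mem_dedup _ _).mp (e ▸ hv)))]

theorem pv_groups_items (artifacts : List (List (String × String))) :
    (artifacts.foldl (fun d a => d.modify (pvDev a) [] (fun l => l ++ [a])) PySem.Dict.empty).items
      = (PySem.List.dedup (artifacts.map pvDev)).map
          (fun v => (v, artifacts.filter (fun a => pvDev a == v))) := by
  set G := artifacts.foldl (fun d a => d.modify (pvDev a) [] (fun l => l ++ [a])) PySem.Dict.empty with hG
  have hkeys : G.keys = PySem.List.dedup (artifacts.map pvDev) := by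
    rw [hG, PySem.Dict.keys_foldl_modify_key artifacts pvDev [] (fun _ a => (fun l => l ++ [a])) PySem.Dict.empty]
    rw [show (PySem.Dict.empty : PySem.Dict String (List (List (String × String)))).keys = ([] : List String) from rfl]
    rw [show (PySem.Set.update ([] : List String) (artifacts.map pvDev)) = PySem.Set.ofList (artifacts.map pvDev) from PySem.Set.update_empty _]
    rw [PySem.List.dedup_eq_ofList]
  have hnd : G.keys.Nodup := by
    rw [hkeys, PySem.List.dedup_eq_ofList]; exact PySem.Set.nodup_ofList _
  have hgetD : ∀ v, G.getD v [] = artifacts.filter (fun a => pvDev a == v) := by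
    intro v
    rw [hG, show (fun (d : PySem.Dict String (List (List (String × String)))) (a : List (String × String)) => d.modify (pvDev a) [] (fun l => l ++ [a]))
        = (fun d a => (fun (d : PySem.Dict String (List (List (String × String)))) (p : String × List (String × String)) => d.modify p.1 [] (fun l => l ++ [p.2])) d ((fun a => (pvDev a, a)) a)) from rfl,
      ← List.foldl_map (f := fun (a : List (String × String)) => (pvDev a, a))
        (g := fun (d : PySem.Dict String (List (List (String × String)))) (p : String × List (String × String)) => d.modify p.1 [] (fun l => l ++ [p.2]))
        (l := artifacts) (init := PySem.Dict.empty),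
      PySem.Dict.getD_foldl_modify_append]
    rw [show (PySem.Dict.empty : PySem.Dict String (List (List (String × String)))).getD v [] = [] from rfl]
    rw [List.filter_map, List.map_map]
    simp [Function.comp_def]
  rw [PySem.Dict.items_eq_map_keys G hnd [], hkeys]
  exact List.map_congr_left (fun v _ => by rw [hgetD v])

theorem pv_groupby_runs (key : List (String × String) → String) (rows : List (List (String × String)))
    (h : rows.Pairwise (fun a b => key a ≤ key b)) :
    pvGroupby key rows = (PySem.List.dedup (rows.map key)).map
      (fun v => (v, rows.filter (fun a => key a == v))) := by
  induction rows using pvGroupby.induct key with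
  | case1 => rw [pvGroupby]; rfl
  | case2 r rest ih =>
    rcases List.pairwise_cons.mp h with ⟨hlow, hrest⟩
    set q : List (String × String) → Bool := fun a => key a == key r with hq
    have hsplitrest : rest.takeWhile q ++ rest.dropWhile q = rest := List.takeWhile_append_dropWhile
    have htake : ∀ a ∈ rest.takeWhile q, key a = key r := by
      intro a ha
      have := List.mem_takeWhile_imp ha
      rwa [hq, beq_iff_eq] at this
    have hdropgt : ∀ a ∈ rest.dropWhile q, key r < key a := by
      have aux : ∀ (l : List (List (String × String))), l.Pairwise (fun a b => key a ≤ key b) →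
          (∀ a ∈ l, key r ≤ key a) → ∀ a ∈ l.dropWhile q, key r < key a := by
        intro l
        induction l with
        | nil => intro _ _ a ha; simp at ha
        | cons b t ihl =>
          intro hpw hlo a ha
          rcases List.pairwise_cons.mp hpw with ⟨hbt, ht⟩
          by_cases hqb : q b = true
          · rw [List.dropWhile_cons_of_pos hqb] at ha
            exact ihl ht (fun x hx => hlo x (by simp [hx])) a ha
          · rw [List.dropWhile_cons_of_neg hqb] at ha
            have hbgt : key r < key b := by
              have hne : key b ≠ key r := by
                rw [hq] at hqb; simpa using hqb
              exact lt_of_le_of_ne (hlo b (by simp)) (Ne.symm hne)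
            rcases List.mem_cons.mp ha with rfl | ha
            · exact hbgt
            · exact lt_of_lt_of_le hbgt (hbt a ha)
      exact aux rest hrest hlow
    have hdedup : PySem.List.dedup ((r :: rest).map key)
        = key r :: PySem.List.dedup ((rest.dropWhile q).map key) := by
      rw [List.map_cons, ← hsplitrest, List.map_append]
      have := pv_dedup_run (key r) ((rest.takeWhile q).map key) ((rest.dropWhile q).map key)
        (fun v hv => by obtain ⟨a, ha, rfl⟩ := List.mem_map.mp hv; exact htake a ha)
        (fun hv => by obtain ⟨a, ha, he⟩ := List.mem_map.mp hv; exact (ne_of_gt (hdropgt a ha)) he)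
      simpa [hsplitrest] using this
    have hfrest : rest.filter (fun a => key a == key r) = rest.takeWhile q := by
      conv_lhs => rw [← hsplitrest]
      rw [List.filter_append,
        List.filter_eq_self.mpr (fun a ha => by simpa using htake a ha),
        List.filter_eq_nil_iff.mpr (fun a ha => by simpa using ne_of_gt (hdropgt a ha)),
        List.append_nil]
    rw [show pvGroupby key (r :: rest)
        = (key r, r :: rest.takeWhile q) :: pvGroupby key (rest.dropWhile q) from by
      rw [pvGroupby]]
    rw [hdedup, List.map_cons,
      show (r :: rest).filter (fun a => key a == key r) = r :: rest.takeWhile q from by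
        rw [List.filter_cons_of_pos (by simp), hfrest]]
    congr 1
    rw [ih (List.Pairwise.sublist (List.dropWhile_sublist _) hrest)]
    apply List.map_congr_left
    intro v hv
    have hvgt : key r < v := by
      rw [PySem.List.mem_dedup] at hv
      obtain ⟨a, ha, rfl⟩ := List.mem_map.mp hv
      exact hdropgt a ha
    have h1 : rest.filter (fun a => key a == v) = (rest.dropWhile q).filter (fun a => key a == v) := by
      conv_lhs => rw [← hsplitrest]
      rw [List.filter_append,
        List.filter_eq_nil_iff.mpr (fun a ha => by
          simp only [beq_eq_false_iff_ne, ne_eq, Bool.not_eq_true]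
          simpa [htake a ha] using ne_of_lt hvgt),
        List.nil_append]
    rw [List.filter_cons_of_neg (by simpa using ne_of_lt hvgt), h1]

theorem pv_process_eq (g : List (List (String × String))) :
    pvProcessA g = PySem.List.sorted (PySem.List.sorted g.reverse pvBn false) pvTs true := by
  show PySem.List.sorted (PySem.List.sorted (PySem.List.sorted
      (PySem.List.sorted g pvTrip false).reverse pvOrd false) pvBn false) pvTs true
    = PySem.List.sorted (PySem.List.sorted g.reverse pvBn false) pvTs true
  refine pv_sortcong (κ := String) pvTs true
    (PySem.List.sorted (PySem.List.sorted
      (PySem.List.sorted g pvTrip false).reverse pvOrd false) pvBn false)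
    (PySem.List.sorted g.reverse pvBn false) ?_ ?_
  · have p1 := PySem.List.sorted_perm (PySem.List.sorted
      (PySem.List.sorted g pvTrip false).reverse pvOrd false) pvBn false
    have p2 := PySem.List.sorted_perm (PySem.List.sorted g pvTrip false).reverse pvOrd false
    have p3 := List.reverse_perm (PySem.List.sorted g pvTrip false)
    have p4 := PySem.List.sorted_perm g pvTrip false
    have p5 := PySem.List.sorted_perm g.reverse pvBn false
    have p6 := List.reverse_perm g
    exact (((p1.trans p2).trans p3).trans p4).trans ((p5.trans p6).symm)
  · intro c
    rw [pv_filter_sorted pvBn false, pv_filter_sorted pvBn false]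
    refine pv_sortcong (κ := Lex (String × String)) pvBn false
      (List.filter (fun a => decide (pvTs a = c)) (PySem.List.sorted
        (PySem.List.sorted g pvTrip false).reverse pvOrd false))
      (List.filter (fun a => decide (pvTs a = c)) g.reverse) ?_ ?_
    · have p2 := PySem.List.sorted_perm (PySem.List.sorted g pvTrip false).reverse pvOrd false
      have p3 := List.reverse_perm (PySem.List.sorted g pvTrip false)
      have p4 := PySem.List.sorted_perm g pvTrip false
      have p6 := List.reverse_perm g
      exact List.Perm.filter _ (((p2.trans p3).trans p4).trans p6.symm)
    · intro v
      rw [List.filter_filter, List.filter_filter]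
      have hp1 : ∀ a : List (String × String),
          (decide (pvBn a = v) && decide (pvTs a = c)) = true → pvOrd a = pvOrdStr c := by
        intro a ha
        simp only [Bool.and_eq_true, decide_eq_true_eq] at ha
        exact pv_ord_of_ts a c ha.2
      rw [pv_filter_sorted_keyconst pvOrd false _ (pvOrdStr c) _ hp1, List.filter_reverse,
        pv_filter_sorted_keyconst pvTrip false _ (toLex ((if c = "" then "" else c), v)) _
          (by intro a ha
              simp only [Bool.and_eq_true, decide_eq_true_eq] at ha
              unfold pvTrip
              rw [ha.1, ha.2]),
        List.filter_reverse]

theorem pv_main (artifacts : List (List (String × String))) :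
    group_by_developer_py artifacts = group_by_developer_py_alt artifacts := by
  show PySem.List.sorted
      ((artifacts.foldl (fun d a => d.modify (pvDev a) [] (fun l => l ++ [a])) PySem.Dict.empty).items.map
        (fun kv => (kv.1, pvProcessA kv.2))) (fun g => g.1) false
    = pvGroupby pvDev (PySem.List.sorted (PySem.List.sorted
        (PySem.List.sorted artifacts.reverse pvBn false) pvTs true) pvDev false)
  set rows3 := PySem.List.sorted (PySem.List.sorted
      (PySem.List.sorted artifacts.reverse pvBn false) pvTs true) pvDev false with hrows3
  have hrows3pw : rows3.Pairwise (fun a b => pvDev a ≤ pvDev b) :=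
    PySem.List.sorted_pairwise _ pvDev
  have hrowsperm : rows3.Perm artifacts := by
    have p1 := PySem.List.sorted_perm (PySem.List.sorted
      (PySem.List.sorted artifacts.reverse pvBn false) pvTs true) pvDev false
    have p2 := PySem.List.sorted_perm (PySem.List.sorted artifacts.reverse pvBn false) pvTs true
    have p3 := PySem.List.sorted_perm artifacts.reverse pvBn false
    have p4 := List.reverse_perm artifacts
    exact ((p1.trans p2).trans p3).trans p4
  have hndA : (PySem.List.dedup (artifacts.map pvDev)).Nodup := by
    rw [PySem.List.dedup_eq_ofList]; exact PySem.Set.nodup_ofList _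
  have hndR : (PySem.List.dedup (rows3.map pvDev)).Nodup := by
    rw [PySem.List.dedup_eq_ofList]; exact PySem.Set.nodup_ofList _
  have hVS : PySem.List.sorted (PySem.List.dedup (artifacts.map pvDev)) (fun v => v) false
      = PySem.List.dedup (rows3.map pvDev) := by
    apply PySem.List.sorted_eq_of_perm_of_pairwise_lt
    · rw [List.perm_ext_iff_of_nodup hndR hndA]
      intro v
      rw [PySem.List.mem_dedup, PySem.List.mem_dedup]
      exact (hrowsperm.map pvDev).mem_iff
    · have hle : (PySem.List.dedup (rows3.map pvDev)).Pairwise (· ≤ ·) :=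
        List.Pairwise.sublist (pv_dedup_sublist _)
          (List.pairwise_map.mpr hrows3pw)
      exact (List.Pairwise.and hle hndR).imp
        (fun hab => lt_of_le_of_ne hab.1 hab.2)
  have hgroup : ∀ v, rows3.filter (fun a => pvDev a == v)
      = pvProcessA (artifacts.filter (fun a => pvDev a == v)) := by
    intro v
    rw [hrows3,
      pv_filter_sorted_keyconst pvDev false _ v _ (fun a ha => by simpa using ha),
      pv_filter_sorted pvTs true, pv_filter_sorted pvBn false, List.filter_reverse,
      pv_process_eq]
  rw [pv_groups_items, pv_groupby_runs pvDev rows3 hrows3pw]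
  have hmapeq : ((PySem.List.dedup (artifacts.map pvDev)).map
        (fun v => (v, artifacts.filter (fun a => pvDev a == v)))).map
        (fun kv => (kv.1, pvProcessA kv.2))
      = (PySem.List.dedup (artifacts.map pvDev)).map
        (fun v => (v, pvProcessA (artifacts.filter (fun a => pvDev a == v)))) := by
    rw [List.map_map]; rfl
  rw [hmapeq]
  apply PySem.List.sorted_eq_of_perm_of_pairwise_lt
  · have hmc : (PySem.List.dedup (rows3.map pvDev)).map
          (fun v => (v, rows3.filter (fun a => pvDev a == v)))
        = (PySem.List.dedup (rows3.map pvDev)).map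
          (fun v => (v, pvProcessA (artifacts.filter (fun a => pvDev a == v)))) := by
      exact List.map_congr_left (fun v _ => by rw [hgroup v])
    rw [hmc]
    apply List.Perm.map
    rw [← hVS]
    exact PySem.List.sorted_perm _ _ _
  · apply List.pairwise_map.mpr
    have hlt : (PySem.List.dedup (rows3.map pvDev)).Pairwise (· < ·) := by
      have hle : (PySem.List.dedup (rows3.map pvDev)).Pairwise (· ≤ ·) :=
        List.Pairwise.sublist (pv_dedup_sublist _)
          (List.pairwise_map.mpr hrows3pw)
      exact (List.Pairwise.and hle hndR).imp
        (fun hab => lt_of_le_of_ne hab.1 hab.2)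
    exact hlt

-- ===== VERDICT (by name: the statement is the Claim_ definition above) =====
theorem group_by_developer_py_spec : Claim_equal_group_by_developer_py := by
  intro artifacts _
  unfold Spec_group_by_developer_py
  exact pv_main artifacts
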